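-- pv_equiv track=rewrite | github.com/Kentemie/Algorithms | LeetCode/HashTable/MatchSubstringAfterReplacement.py | matchReplacement
-- ===== SOURCE A (Python) =====
-- from collections import defaultdict
--
-- def matchReplacement(s, sub, mappings):
--     mapping = defaultdict(set)
--     n = len(s)
--     m = len(sub)
--
--     for map in mappings:
--         mapping[map[0]].add(map[1])
--
--     for i in range(n - m + 1):
--         cnt = 0
--         for j in range(m):
--             if s[i + j] == sub[j] or s[i + j] in mapping[sub[j]]:
--                 cnt += 1
--             else:
--                 break
--         if cnt == m:
--             return True
--
--     return False
-- ===== SOURCE B (Python) =====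
-- def matchReplacement(s, sub, mappings):
--     allowed = {}
--     for mp in mappings:
--         allowed.setdefault(mp[0], set()).add(mp[1])
--     n, m = len(s), len(sub)
--     candidates = list(range(n - m + 1))
--     for j, c in enumerate(sub):
--         if not candidates:
--             break
--         ok = allowed.get(c, ())
--         candidates = [i for i in candidates if s[i + j] == c or s[i + j] in ok]
--     return len(candidates) > 0
-- ===== Notes on version B (the rewrite author's own statement) =====
-- stated objective: alternative
-- what changed: B replaces A's per-alignment inner scan with break by a column-wise sieve: it keeps the list of still-viable start positions, filters it once per pattern position, and stops as soon as no candidate survives.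
import Mathlib
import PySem

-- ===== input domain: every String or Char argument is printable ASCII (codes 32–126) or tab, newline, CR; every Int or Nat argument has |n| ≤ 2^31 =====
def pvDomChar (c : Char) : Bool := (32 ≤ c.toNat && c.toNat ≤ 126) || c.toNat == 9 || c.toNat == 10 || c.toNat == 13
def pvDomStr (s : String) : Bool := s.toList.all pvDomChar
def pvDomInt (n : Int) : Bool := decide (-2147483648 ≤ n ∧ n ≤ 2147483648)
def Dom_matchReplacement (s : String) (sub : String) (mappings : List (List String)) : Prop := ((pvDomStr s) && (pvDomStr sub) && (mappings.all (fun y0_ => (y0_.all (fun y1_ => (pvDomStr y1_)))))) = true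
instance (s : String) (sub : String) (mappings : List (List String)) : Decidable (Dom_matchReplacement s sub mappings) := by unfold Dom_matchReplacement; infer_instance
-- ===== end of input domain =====

-- B replaces A's per-alignment inner scan (with break) by a column-wise sieve over the
-- surviving start positions; same return value on Pre_ (mapping entries of length ≥ 2).

-- ===== PORT A =====
-- mp[0] / mp[1]; the .getD "" default is never reached under Pre_ (every entry has length ≥ 2)
def pvKey (mp : List String) : String := (PySem.List.pyGet? mp 0).getD ""
def pvVal (mp : List String) : String := (PySem.List.pyGet? mp 1).getD ""

-- for map in mappings: mapping[map[0]].add(map[1])   (defaultdict(set))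
def pvBuild (mappings : List (List String)) : PySem.Dict String (PySem.Set String) :=
  mappings.foldl
    (fun d mp => d.insert (pvKey mp) (PySem.Set.add (d.getD (pvKey mp) PySem.Set.empty) (pvVal mp)))
    PySem.Dict.empty

-- s[i + j] == sub[j] or s[i + j] in mapping[sub[j]]  (the .getD ' ' defaults are never
-- reached: i + j and j are in range for the indices the loops produce)
def pvCondA (mapping : PySem.Dict String (PySem.Set String)) (sl subl : List Char) (i j : Int) : Bool :=
  let a := (PySem.List.pyGet? sl (i + j)).getD ' '
  let b := (PySem.List.pyGet? subl j).getD ' '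
  a == b || PySem.Set.contains (mapping.getD (String.mk [b]) PySem.Set.empty) (String.mk [a])

-- inner 'for j in range(m): … else: break' loop, cnt accumulator
def pvInner (mapping : PySem.Dict String (PySem.Set String)) (sl subl : List Char) (i : Int) : List Int → Int → Int
  | [], cnt => cnt
  | j :: js, cnt => if pvCondA mapping sl subl i j then pvInner mapping sl subl i js (cnt + 1) else cnt

-- outer 'for i in range(n - m + 1)' loop with early 'return True'
def pvOuter (mapping : PySem.Dict String (PySem.Set String)) (sl subl : List Char) (m : Int) : List Int → Bool
  | [] => false
  | i :: is =>
      if pvInner mapping sl subl i (PySem.List.pyRange 0 m) 0 == m then true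
      else pvOuter mapping sl subl m is

def matchReplacement (s : String) (sub : String) (mappings : List (List String)) : Bool :=
  let mapping := pvBuild mappings
  let sl := s.toList
  let subl := sub.toList
  let n : Int := sl.length
  let m : Int := subl.length
  pvOuter mapping sl subl m (PySem.List.pyRange 0 (n - m + 1))

-- ===== PORT B =====
-- allowed.setdefault(mp[0], set()).add(mp[1])   (allowed[mp[0]] = allowed.get(mp[0], set()) with mp[1] added)
def pvBuildB (mappings : List (List String)) : PySem.Dict String (PySem.Set String) :=
  mappings.foldl
    (fun d mp => d.modify (pvKey mp) PySem.Set.empty (fun st => PySem.Set.add st (pvVal mp)))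
    PySem.Dict.empty

-- the column-wise sieve: one filtering pass per (j, c) in enumerate(sub), stopping
-- early once no candidate start position survives ('if not candidates: break')
def pvSieve (allowed : PySem.Dict String (PySem.Set String)) (sl : List Char) :
    List (Int × Char) → List Int → List Int
  | [], cand => cand
  | jc :: rest, cand =>
      if cand.isEmpty then cand
      else pvSieve allowed sl rest (cand.filter (fun i =>
        let ch := (PySem.List.pyGet? sl (i + jc.1)).getD ' '
        ch == jc.2 || PySem.Set.contains (allowed.getD (String.mk [jc.2]) PySem.Set.empty) (String.mk [ch])))

def matchReplacement_alt (s : String) (sub : String) (mappings : List (List String)) : Bool :=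
  let allowed := pvBuildB mappings
  let sl := s.toList
  let subl := sub.toList
  let n : Int := sl.length
  let m : Int := subl.length
  let cands := pvSieve allowed sl (PySem.List.enumerate subl) (PySem.List.pyRange 0 (n - m + 1))
  decide (0 < cands.length)

-- ===== PRECONDITION & SPEC =====
-- Pre_ excludes exactly the inputs on which the Python A raises IndexError:
-- a mapping entry with fewer than 2 elements (map[0] / map[1]).
def Pre_matchReplacement (s : String) (sub : String) (mappings : List (List String)) : Prop :=
  ∀ mp ∈ mappings, 2 ≤ mp.length
instance (s : String) (sub : String) (mappings : List (List String)) : Decidable (Pre_matchReplacement s sub mappings) := by unfold Pre_matchReplacement; infer_instance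

def pvWitness_matchReplacement : String × String × List (List String) := ("abc", "b", [["b", "a"]])

def Spec_matchReplacement (s : String) (sub : String) (mappings : List (List String)) (out : Bool) : Prop := out = matchReplacement_alt s sub mappings
instance (s : String) (sub : String) (mappings : List (List String)) (out : Bool) : Decidable (Spec_matchReplacement s sub mappings out) := by unfold Spec_matchReplacement; infer_instance

-- ===== CLAIM (what is proved, stated in full; the proofs are below) =====
def Claim_equal_matchReplacement : Prop := ∀ (s : String) (sub : String) (mappings : List (List String)), Dom_matchReplacement s sub mappings → Pre_matchReplacement s sub mappings → Spec_matchReplacement s sub mappings (matchReplacement s sub mappings)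


-- ===== LEMMAS AND PROOFS =====

-- membership in A's defaultdict after the build loop
theorem pvBuild_mem (mappings : List (List String))
    (d : PySem.Dict String (PySem.Set String)) (k v : String) :
    v ∈ (mappings.foldl
        (fun d mp => d.insert (pvKey mp) (PySem.Set.add (d.getD (pvKey mp) PySem.Set.empty) (pvVal mp)))
        d).getD k PySem.Set.empty
    ↔ v ∈ d.getD k PySem.Set.empty ∨ ∃ mp ∈ mappings, pvKey mp = k ∧ pvVal mp = v := by
  induction mappings generalizing d with
  | nil => simp
  | cons mp rest ih =>
      simp only [List.foldl_cons, ih, PySem.Dict.getD_insert, List.mem_cons]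
      by_cases hk : k = pvKey mp
      · subst hk
        rw [if_pos rfl, PySem.Set.mem_add]
        constructor
        · rintro (⟨h | h⟩ | h)
          · exact Or.inl h
          · exact Or.inr ⟨mp, Or.inl rfl, rfl, h.symm⟩
          · rcases h with ⟨mp', hmp', hkk, hvv⟩; exact Or.inr ⟨mp', Or.inr hmp', hkk, hvv⟩
        · rintro (h | ⟨mp', hmp', hkk, hvv⟩)
          · exact Or.inl (Or.inl h)
          · rcases hmp' with rfl | hmp'
            · exact Or.inl (Or.inr hvv.symm)
            · exact Or.inr ⟨mp', hmp', hkk, hvv⟩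
      · rw [if_neg hk]
        constructor
        · rintro (h | ⟨mp', hmp', hkk, hvv⟩)
          · exact Or.inl h
          · exact Or.inr ⟨mp', Or.inr hmp', hkk, hvv⟩
        · rintro (h | ⟨mp', hmp', hkk, hvv⟩)
          · exact Or.inl h
          · rcases hmp' with rfl | hmp'
            · exact absurd hkk.symm hk
            · exact Or.inr ⟨mp', hmp', hkk, hvv⟩

-- membership in B's allowed dict after the setdefault loop
theorem pvBuildB_mem (mappings : List (List String))
    (d : PySem.Dict String (PySem.Set String)) (k v : String) :
    v ∈ (mappings.foldl
        (fun d mp => d.modify (pvKey mp) PySem.Set.empty (fun st => PySem.Set.add st (pvVal mp)))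
        d).getD k PySem.Set.empty
    ↔ v ∈ d.getD k PySem.Set.empty ∨ ∃ mp ∈ mappings, pvKey mp = k ∧ pvVal mp = v := by
  induction mappings generalizing d with
  | nil => simp
  | cons mp rest ih =>
      simp only [List.foldl_cons, ih, PySem.Dict.getD_modify, List.mem_cons]
      by_cases hk : k = pvKey mp
      · subst hk
        rw [if_pos rfl, PySem.Set.mem_add]
        constructor
        · rintro (⟨h | h⟩ | h)
          · exact Or.inl h
          · exact Or.inr ⟨mp, Or.inl rfl, rfl, h.symm⟩
          · rcases h with ⟨mp', hmp', hkk, hvv⟩; exact Or.inr ⟨mp', Or.inr hmp', hkk, hvv⟩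
        · rintro (h | ⟨mp', hmp', hkk, hvv⟩)
          · exact Or.inl (Or.inl h)
          · rcases hmp' with rfl | hmp'
            · exact Or.inl (Or.inr hvv.symm)
            · exact Or.inr ⟨mp', hmp', hkk, hvv⟩
      · rw [if_neg hk]
        constructor
        · rintro (h | ⟨mp', hmp', hkk, hvv⟩)
          · exact Or.inl h
          · exact Or.inr ⟨mp', Or.inr hmp', hkk, hvv⟩
        · rintro (h | ⟨mp', hmp', hkk, hvv⟩)
          · exact Or.inl h
          · rcases hmp' with rfl | hmp'
            · exact absurd hkk.symm hk
            · exact Or.inr ⟨mp', hmp', hkk, hvv⟩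

-- the two per-character tests agree once the pattern character is fixed
theorem pvCond_agree (mappings : List (List String)) (sl subl : List Char) (i j : Int)
    (c : Char) (hc : PySem.List.pyGet? subl j = some c) :
    pvCondA (pvBuild mappings) sl subl i j
    = (((PySem.List.pyGet? sl (i + j)).getD ' ') == c
       || PySem.Set.contains ((pvBuildB mappings).getD (String.mk [c]) PySem.Set.empty)
            (String.mk [(PySem.List.pyGet? sl (i + j)).getD ' '])) := by
  simp only [pvCondA, hc, Option.getD_some]
  rw [Bool.eq_iff_iff]
  simp only [Bool.or_eq_true, PySem.Set.contains_iff]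
  rw [pvBuild, pvBuild_mem, pvBuildB, pvBuildB_mem]

-- A's inner counting loop hits m exactly when every position matches
theorem pvInner_eq_iff (mapping : PySem.Dict String (PySem.Set String)) (sl subl : List Char)
    (i : Int) (js : List Int) (cnt : Int) :
    pvInner mapping sl subl i js cnt = cnt + js.length
    ↔ ∀ j ∈ js, pvCondA mapping sl subl i j = true := by
  induction js generalizing cnt with
  | nil => simp [pvInner]
  | cons j js ih =>
      simp only [pvInner, List.length_cons, List.mem_cons]
      by_cases h : pvCondA mapping sl subl i j = true
      · rw [if_pos h,
            show (cnt + (((js.length + 1 : Nat)) : Int)) = (cnt + 1) + (js.length : Int) by push_cast; ring,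
            ih (cnt + 1)]
        constructor
        · intro hall j' hj'
          rcases hj' with rfl | hj'
          · exact h
          · exact hall j' hj'
        · intro hall j' hj'
          exact hall j' (Or.inr hj')
      · rw [if_neg h]
        constructor
        · intro hcnt
          exfalso
          omega
        · intro hall
          exact absurd (hall j (Or.inl rfl)) h

-- A's outer loop with early return is List.any
theorem pvOuter_eq_any (mapping : PySem.Dict String (PySem.Set String)) (sl subl : List Char)
    (m : Int) (is : List Int) :
    pvOuter mapping sl subl m is
    = is.any (fun i => pvInner mapping sl subl i (PySem.List.pyRange 0 m) 0 == m) := by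
  induction is with
  | nil => simp [pvOuter]
  | cons i is ih =>
      simp only [pvOuter, List.any_cons]
      by_cases h : pvInner mapping sl subl i (PySem.List.pyRange 0 m) 0 == m
      · rw [if_pos h, h, Bool.true_or]
      · rw [if_neg h, ih]
        cases hb : (pvInner mapping sl subl i (PySem.List.pyRange 0 m) 0 == m)
        · simp
        · exact absurd hb h

-- B's sieve (with its early break on an empty candidate list) is one filter
-- by the conjunction of all the per-position tests
theorem pvSieve_eq (allowed : PySem.Dict String (PySem.Set String)) (sl : List Char)
    (l : List (Int × Char)) (cand : List Int) :
    pvSieve allowed sl l cand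
    = cand.filter (fun i => l.all (fun jc =>
        ((PySem.List.pyGet? sl (i + jc.1)).getD ' ') == jc.2
        || PySem.Set.contains (allowed.getD (String.mk [jc.2]) PySem.Set.empty)
             (String.mk [(PySem.List.pyGet? sl (i + jc.1)).getD ' ']))) := by
  induction l generalizing cand with
  | nil => simp [pvSieve]
  | cons jc l ih =>
      simp only [pvSieve]
      by_cases he : cand.isEmpty
      · rw [if_pos he]
        rw [List.isEmpty_iff.mp he]
        simp
      · rw [if_neg he, ih, List.filter_filter]
        apply List.filter_congr
        intro i _
        simp [Bool.and_comm]

-- ===== VERDICT (by name: the statement is the Claim_ definition above) =====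
theorem matchReplacement_spec : Claim_equal_matchReplacement := by
  intro s sub mappings _ _
  unfold Spec_matchReplacement
  simp only [matchReplacement, matchReplacement_alt]
  rw [pvOuter_eq_any, pvSieve_eq]
  have key : ∀ i : Int,
      (pvInner (pvBuild mappings) s.toList sub.toList i
          (PySem.List.pyRange 0 (sub.toList.length : Int)) 0 == (sub.toList.length : Int)) = true
      ↔ ((PySem.List.enumerate sub.toList).all (fun jc =>
            ((PySem.List.pyGet? s.toList (i + jc.1)).getD ' ') == jc.2
            || PySem.Set.contains ((pvBuildB mappings).getD (String.mk [jc.2]) PySem.Set.empty)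
                 (String.mk [(PySem.List.pyGet? s.toList (i + jc.1)).getD ' ']))) = true := by
    intro i
    rw [beq_iff_eq, PySem.List.pyRange_zero_natCast]
    have hinner := pvInner_eq_iff (pvBuild mappings) s.toList sub.toList i
      ((List.range sub.toList.length).map (fun k : Nat => (k : Int))) 0
    have hlen : (((List.range sub.toList.length).map (fun k : Nat => (k : Int))).length : Int)
        = (sub.toList.length : Int) := by rw [List.length_map, List.length_range]
    rw [zero_add, hlen] at hinner
    rw [hinner, List.all_eq_true]
    constructor
    · intro hall jc hjc
      rcases (PySem.List.mem_enumerate_iff _ _ _).mp hjc with ⟨k, hk, rfl⟩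
      have hc : PySem.List.pyGet? sub.toList ((k : Nat) : Int) = some sub.toList[k] := by
        rw [PySem.List.pyGet?_natCast, List.getElem?_eq_getElem hk]
      have := hall ((k : Nat) : Int) (List.mem_map.mpr ⟨k, List.mem_range.mpr hk, rfl⟩)
      rw [pvCond_agree mappings s.toList sub.toList i _ _ hc] at this
      simpa using this
    · intro hall j hj
      rcases List.mem_map.mp hj with ⟨k, hk, rfl⟩
      have hk' : k < sub.toList.length := List.mem_range.mp hk
      have hc : PySem.List.pyGet? sub.toList ((k : Nat) : Int) = some sub.toList[k] := by
        rw [PySem.List.pyGet?_natCast, List.getElem?_eq_getElem hk']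
      rw [pvCond_agree mappings s.toList sub.toList i _ _ hc]
      have hmem : ((0 : Int) + (k : Int), sub.toList[k]) ∈ PySem.List.enumerate sub.toList :=
        (PySem.List.mem_enumerate_iff _ _ _).mpr ⟨k, hk', rfl⟩
      have := hall _ hmem
      simpa using this
  rw [Bool.eq_iff_iff]
  simp only [List.any_eq_true, decide_eq_true_eq, List.length_pos_iff_exists_mem, List.mem_filter]
  constructor
  · rintro ⟨i, hi, h⟩
    exact ⟨i, hi, ((key i).mp h)⟩
  · rintro ⟨i, hi, h⟩
    exact ⟨i, hi, ((key i).mpr h)⟩
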